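-- pv_equiv track=rewrite | github.com/DPNT-Sourcecode/CHK-ahvh01 | lib/solutions/CHK/checkout_solution.py | process_discounts
-- ===== SOURCE A (Python) =====
-- DISCOUNT_OFFERS = {
--     # Item: [[Amount, Price], ...]
--     "A": [[5, 200], [3, 130]],
--     "B": [[2, 45]],
--     "H": [[5, 45], [10, 80]],
--     "K": [[2000, 150]],
--     "P": [[5, 200]],
--     "Q": [[3, 80]],
--     "V": [[2, 90], [3, 130]],
-- }
--
-- def process_discounts(cart, total):
--     for item, offers in DISCOUNT_OFFERS.items():
--         if item in cart.keys():
--             for item_amount_required, discount_price in offers: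
--                 while True:
--                     if cart[item] // item_amount_required:
--                         cart[item] -= item_amount_required
--                         total += discount_price
--                     else:
--                         break
--     return total, cart
-- ===== SOURCE B (Python) =====
-- DISCOUNT_OFFERS = {
--     # Item: [[Amount, Price], ...]
--     "A": [[5, 200], [3, 130]],
--     "B": [[2, 45]],
--     "H": [[5, 45], [10, 80]],
--     "K": [[2000, 150]],
--     "P": [[5, 200]],
--     "Q": [[3, 80]],
--     "V": [[2, 90], [3, 130]],
-- }
--
-- def process_discounts(cart, total):
--     # closed form: each offer consumes divmod-many bundles at once instead of
--     # subtracting one bundle per loop iteration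
--     for item, offers in DISCOUNT_OFFERS.items():
--         if item in cart:
--             count = cart[item]
--             for amount, price in offers:
--                 bundles, count = divmod(count, amount)
--                 total += bundles * price
--             cart[item] = count
--     return total, cart
-- ===== Notes on version B (the rewrite author's own statement) =====
-- stated objective: alternative
-- what changed: B computes each offer's effect in closed form with one divmod (bundles = count // amount, count %= amount, total += bundles * price) and writes the cart entry back once, instead of A's while loop that subtracts one bundle and re-reads/re-writes the dict per iteration.
import Mathlib
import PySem

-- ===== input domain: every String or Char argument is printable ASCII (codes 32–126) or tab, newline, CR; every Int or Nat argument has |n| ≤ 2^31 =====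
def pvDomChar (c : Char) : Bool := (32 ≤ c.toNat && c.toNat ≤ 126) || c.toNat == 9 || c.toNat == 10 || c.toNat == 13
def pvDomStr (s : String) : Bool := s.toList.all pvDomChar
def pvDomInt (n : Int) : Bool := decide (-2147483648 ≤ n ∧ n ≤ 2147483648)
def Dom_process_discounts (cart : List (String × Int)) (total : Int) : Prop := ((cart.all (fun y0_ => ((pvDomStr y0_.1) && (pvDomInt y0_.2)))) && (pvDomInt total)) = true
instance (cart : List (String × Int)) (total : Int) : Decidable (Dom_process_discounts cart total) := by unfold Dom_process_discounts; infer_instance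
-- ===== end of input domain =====

-- B replaces A's one-bundle-at-a-time subtraction loop by a divmod closed form per offer,
-- with a single write-back per item; return value AND the in-place cart mutation are reproduced.

-- ===== PORT A =====
def pvOffers : List (String × List (Int × Int)) :=
  [("A", [(5,200),(3,130)]), ("B", [(2,45)]), ("H", [(5,45),(10,80)]),
   ("K", [(2000,150)]), ("P", [(5,200)]), ("Q", [(3,80)]), ("V", [(2,90),(3,130)])]

-- the 'while True: if cart[item] // a: cart[item] -= a; total += p else: break' loop;
-- fuel makes it total: under Pre_ (count ≥ 0, amounts ≥ 1) the fuel 'count+1' chosen at the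
-- call site is never exhausted, so it is exact there.  cart[item] is read with getD 0, which
-- is exact because the surrounding 'item in cart' guard (and every insert) keeps the key present.
def pvWhileA (item : String) (a p : Int) :
    Nat → Int × PySem.Dict String Int → Int × PySem.Dict String Int
  | 0, st => st
  | f+1, (t, c) =>
      if PySem.Int.floordiv ((c.get? item).getD 0) a ≠ 0 then
        pvWhileA item a p f (t + p, c.insert item ((c.get? item).getD 0 - a))
      else (t, c)

-- body of A's outer 'for item, offers in DISCOUNT_OFFERS.items()' loop
def pvStepA (st : Int × PySem.Dict String Int) (e : String × List (Int × Int)) :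
    Int × PySem.Dict String Int :=
  if (st.2.get? e.1).isSome then
    e.2.foldl (fun st2 op =>
      pvWhileA e.1 op.1 op.2 (((st2.2.get? e.1).getD 0).toNat + 1) st2) st
  else st

def process_discounts (cart : List (String × Int)) (total : Int) : Int × (List (String × Int)) :=
  let st := pvOffers.foldl pvStepA (total, PySem.Dict.mk cart)
  (st.1, st.2.items)

-- ===== PORT B =====
-- body of B's outer loop: read count once, fold divmod over the offers, write count back.
-- divmod is ported as (floordiv, mod): exact since every divisor is a nonzero literal.
def pvStepB (st : Int × PySem.Dict String Int) (e : String × List (Int × Int)) :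
    Int × PySem.Dict String Int :=
  if (st.2.get? e.1).isSome then
    let r := e.2.foldl (fun q op =>
      (q.1 + PySem.Int.floordiv q.2 op.1 * op.2, PySem.Int.mod q.2 op.1))
      (st.1, (st.2.get? e.1).getD 0)
    (r.1, st.2.insert e.1 r.2)
  else st

def process_discounts_alt (cart : List (String × Int)) (total : Int) : Int × (List (String × Int)) :=
  let st := pvOffers.foldl pvStepB (total, PySem.Dict.mk cart)
  (st.1, st.2.items)

-- ===== PRECONDITION & SPEC =====
def pvOfferKeys : List String := ["A","B","H","K","P","Q","V"]

-- Pre_ excludes (i) carts holding a NEGATIVE count for an item that has an offer — there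
-- Python A never returns (its while loop subtracts forever); and (ii) association lists with
-- duplicate keys, which cannot arise from a Python dict argument.
def Pre_process_discounts (cart : List (String × Int)) (total : Int) : Prop :=
  (cart.map Prod.fst).Nodup ∧ ∀ p ∈ cart, p.1 ∈ pvOfferKeys → 0 ≤ p.2
instance (cart : List (String × Int)) (total : Int) : Decidable (Pre_process_discounts cart total) := by unfold Pre_process_discounts; infer_instance

def pvWitness_process_discounts : (List (String × Int)) × Int := ([("A", 8), ("X", -3)], 10)

def Spec_process_discounts (cart : List (String × Int)) (total : Int) (out : Int × (List (String × Int))) : Prop := out = process_discounts_alt cart total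
instance (cart : List (String × Int)) (total : Int) (out : Int × (List (String × Int))) : Decidable (Spec_process_discounts cart total out) := by unfold Spec_process_discounts; infer_instance

-- ===== CLAIM (what is proved, stated in full; the proofs are below) =====
def Claim_equal_process_discounts : Prop := ∀ (cart : List (String × Int)) (total : Int), Dom_process_discounts cart total → Pre_process_discounts cart total → Spec_process_discounts cart total (process_discounts cart total)

-- ===== LEMMAS AND PROOFS =====

-- value invariant carried through the outer loop
def pvInv (c : PySem.Dict String Int) : Prop :=
  ∀ p ∈ c.items, p.1 ∈ pvOfferKeys → 0 ≤ p.2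

-- overwriting a key with the value it already has is a no-op (nodup keys)
lemma pv_insert_self {c : PySem.Dict String Int} {k : String} {v : Int}
    (hnd : c.keys.Nodup) (h : c.get? k = some v) : c.insert k v = c := by
  apply PySem.Dict.ext
  have hc : c.contains k = true := by
    rw [PySem.Dict.contains_eq_isSome_get?, h]; rfl
  rw [PySem.Dict.items_insert, if_pos hc]
  have hcong : c.items.map (fun p => if (p.1 == k) = true then (k, v) else p)
      = c.items.map id := by
    apply List.map_congr_left
    rintro ⟨pk, pv⟩ hp
    by_cases hk : pk = k
    · have h2 : c.get? pk = some pv := PySem.Dict.get?_of_mem_items c hp hnd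
      rw [hk, h] at h2
      have hv2 : v = pv := Option.some_inj.mp h2
      simp [hk, hv2]
    · simp [hk]
  rw [hcong, List.map_id]

-- A's while loop computed in closed form
lemma pv_whileA_eq (item : String) (a p : Int) (ha : 0 < a) :
    ∀ (f : Nat) (t : Int) (c : PySem.Dict String Int) (v : Int),
      c.get? item = some v → 0 ≤ v → v.toNat < f →
      pvWhileA item a p f (t, c)
        = (t + PySem.Int.floordiv v a * p,
           if PySem.Int.floordiv v a = 0 then c
           else c.insert item (PySem.Int.mod v a)) := by
  intro f
  induction f with
  | zero => intro t c v h hv hf; omega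
  | succ f ih =>
    intro t c v h hv hf
    have hfd : PySem.Int.floordiv v a = v / a := PySem.Int.floordiv_eq_ediv_of_pos ha
    have hmd : PySem.Int.mod v a = v % a := PySem.Int.mod_eq_emod_of_pos ha
    simp only [pvWhileA, h, Option.getD_some]
    by_cases hq : PySem.Int.floordiv v a = 0
    · simp [hq]
    · rw [if_pos hq]
      have hq' : v / a ≠ 0 := by rw [hfd] at hq; exact hq
      have hge : a ≤ v := by
        by_contra hlt
        exact hq (by rw [hfd, Int.ediv_eq_zero_of_lt hv (by omega)])
      have h1 : (c.insert item (v - a)).get? item = some (v - a) :=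
        PySem.Dict.get?_insert_self c item (v - a)
      have ih' := ih (t + p) (c.insert item (v - a)) (v - a) h1 (by omega) (by omega)
      have hfd' : PySem.Int.floordiv (v - a) a = (v - a) / a :=
        PySem.Int.floordiv_eq_ediv_of_pos ha
      have hmd' : PySem.Int.mod (v - a) a = (v - a) % a :=
        PySem.Int.mod_eq_emod_of_pos ha
      have e1 : (v - a) / a = v / a - 1 := by
        have := Int.add_mul_ediv_right v (-1) (show a ≠ 0 by omega)
        simpa [sub_eq_add_neg] using this
      have e2 : (v - a) % a = v % a := Int.sub_emod_right v a
      rw [ih', hfd', hmd', e1, e2, hfd, hmd]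
      by_cases hq1 : v / a = 1
      · have hv' : v % a = v - a := by
          have := Int.emod_def v a
          rw [hq1] at this; omega
        rw [hq1, hv']
        norm_num
      · have hne : v / a - 1 ≠ 0 := sub_ne_zero_of_ne hq1
        rw [if_neg hne, if_neg hq', PySem.Dict.insert_insert_self]
        simp only [Prod.mk.injEq]
        exact ⟨by ring, trivial⟩

lemma pv_foldB_nonneg (os : List (Int × Int)) (hos : ∀ op ∈ os, 0 < op.1) :
    ∀ (t v : Int), 0 ≤ v →
      0 ≤ (os.foldl (fun q op =>
        (q.1 + PySem.Int.floordiv q.2 op.1 * op.2, PySem.Int.mod q.2 op.1)) (t, v)).2 := by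
  induction os with
  | nil => intro t v hv; simpa using hv
  | cons op os' ih =>
    intro t v hv
    have ha : 0 < op.1 := hos op (List.mem_cons_self ..)
    simp only [List.foldl_cons]
    apply ih (fun o ho => hos o (List.mem_cons_of_mem _ ho))
    rw [PySem.Int.mod_eq_emod_of_pos ha]
    exact Int.emod_nonneg v (by omega)

-- per-item: A's fold of while loops over the offers = B's divmod fold plus one insert
lemma pv_item_eq (item : String) (os : List (Int × Int)) (hos : ∀ op ∈ os, 0 < op.1) :
    ∀ (t : Int) (c : PySem.Dict String Int) (v : Int),
      c.keys.Nodup → c.get? item = some v → 0 ≤ v →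
      os.foldl (fun st2 op =>
          pvWhileA item op.1 op.2 (((st2.2.get? item).getD 0).toNat + 1) st2) (t, c)
        = ((os.foldl (fun q op =>
              (q.1 + PySem.Int.floordiv q.2 op.1 * op.2, PySem.Int.mod q.2 op.1)) (t, v)).1,
           c.insert item (os.foldl (fun q op =>
              (q.1 + PySem.Int.floordiv q.2 op.1 * op.2, PySem.Int.mod q.2 op.1)) (t, v)).2) := by
  induction os with
  | nil =>
    intro t c v hnd h hv
    simp only [List.foldl_nil]
    rw [pv_insert_self hnd h]
  | cons op os' ih =>
    obtain ⟨a, p⟩ := op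
    intro t c v hnd h hv
    have ha : (0:Int) < a := hos (a, p) (List.mem_cons_self ..)
    have hos' : ∀ o ∈ os', 0 < o.1 := fun o ho => hos o (List.mem_cons_of_mem _ ho)
    simp only [List.foldl_cons, h, Option.getD_some]
    rw [pv_whileA_eq item a p ha (v.toNat + 1) t c v h hv (by omega)]
    have hmd : PySem.Int.mod v a = v % a := PySem.Int.mod_eq_emod_of_pos ha
    have hfd : PySem.Int.floordiv v a = v / a := PySem.Int.floordiv_eq_ediv_of_pos ha
    have hm0 : 0 ≤ PySem.Int.mod v a := by rw [hmd]; exact Int.emod_nonneg v (by omega)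
    by_cases hq : PySem.Int.floordiv v a = 0
    · rw [if_pos hq]
      have hlt : v < a := by
        by_contra hge
        rw [hfd] at hq
        have : 1 ≤ v / a := (Int.le_ediv_iff_mul_le ha).mpr (by omega)
        omega
      have hmv : PySem.Int.mod v a = v := by rw [hmd]; exact Int.emod_eq_of_lt hv hlt
      rw [hmv]
      exact ih hos' (t + PySem.Int.floordiv v a * p) c v hnd h hv
    · rw [if_neg hq]
      have h1 : (c.insert item (PySem.Int.mod v a)).get? item = some (PySem.Int.mod v a) :=
        PySem.Dict.get?_insert_self c item (PySem.Int.mod v a)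
      have hnd' : (c.insert item (PySem.Int.mod v a)).keys.Nodup :=
        PySem.Dict.nodup_keys_insert c item (PySem.Int.mod v a) hnd
      rw [ih hos' (t + PySem.Int.floordiv v a * p) _ _ hnd' h1 hm0,
        PySem.Dict.insert_insert_self]

lemma pv_outer_eq (es : List (String × List (Int × Int)))
    (hes : ∀ e ∈ es, e.1 ∈ pvOfferKeys ∧ ∀ op ∈ e.2, 0 < op.1) :
    ∀ (t : Int) (c : PySem.Dict String Int), c.keys.Nodup → pvInv c →
      es.foldl pvStepA (t, c) = es.foldl pvStepB (t, c) := by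
  induction es with
  | nil => intro t c _ _; rfl
  | cons e es' ih =>
    obtain ⟨item, os⟩ := e
    intro t c hnd hinv
    obtain ⟨hkey, hos⟩ := hes (item, os) (List.mem_cons_self ..)
    have hes' : ∀ e ∈ es', e.1 ∈ pvOfferKeys ∧ ∀ op ∈ e.2, 0 < op.1 :=
      fun e he => hes e (List.mem_cons_of_mem _ he)
    simp only [List.foldl_cons]
    unfold pvStepA pvStepB
    cases hsome : (c.get? item) with
    | none => simp only [hsome, Option.isSome_none, Bool.false_eq_true, if_neg,
        reduceIte]; exact ih hes' t c hnd hinv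
    | some v =>
      have hv : 0 ≤ v :=
        hinv (item, v) (PySem.Dict.mem_items_of_get?_eq_some c hsome) hkey
      simp only [hsome, Option.isSome_some, if_pos, reduceIte, Option.getD_some]
      rw [pv_item_eq item os hos t c v hnd hsome hv]
      set r := os.foldl (fun q op =>
        (q.1 + PySem.Int.floordiv q.2 op.1 * op.2, PySem.Int.mod q.2 op.1)) (t, v) with hr
    -- invariants for the new state
      have hr2 : 0 ≤ r.2 := pv_foldB_nonneg os hos t v hv
      have hnd' : (c.insert item r.2).keys.Nodup :=
        PySem.Dict.nodup_keys_insert c item r.2 hnd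
      have hinv' : pvInv (c.insert item r.2) := by
        intro q hq hqk
        rcases (PySem.Dict.mem_items_insert _ _ _ _).mp hq with hq1 | ⟨hq2, _⟩
        · rw [hq1]; exact hr2
        · exact hinv q hq2 hqk
      exact ih hes' r.1 (c.insert item r.2) hnd' hinv'

-- ===== VERDICT (by name: the statement is the Claim_ definition above) =====
theorem process_discounts_spec : Claim_equal_process_discounts := by
  intro cart total _hdom hpre
  unfold Spec_process_discounts process_discounts process_discounts_alt
  obtain ⟨hnd, hvals⟩ := hpre
  have hnd' : (PySem.Dict.mk cart).keys.Nodup := by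
    simpa [PySem.Dict.keys, PySem.Dict.items] using hnd
  have hinv : pvInv (PySem.Dict.mk cart) := by
    intro p hp hpk
    exact hvals p hp hpk
  rw [pv_outer_eq pvOffers (by decide) total (PySem.Dict.mk cart) hnd' hinv]
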